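-- pv_equiv track=rewrite | github.com/ReneFabricius/project-euler | pr109.py | countCheckouts
-- ===== SOURCE A (Python) =====
-- def countCheckouts(Lmt):
--     P = [i for i in range(1, 21)]
--     d_P = [2*i for i in P]
--     t_P = [3*i for i in P]
--     P = P + d_P + t_P + [25, 50]
--     D = [0] * 20 + [1] * 20 + [0]*20 + [0, 1]
--     counter = 0
--
--
--     for k in range(len(P)):
--         if D[k] == 1 and P[k] <= Lmt:
--             counter += 1
--
--         for l in range(k, len(P)):
--             if  P[l] + P[k] <= Lmt:
--                 dst_1 = list(set([k, l]))
--                 d_d_1 = sum([D[y] for y in dst_1])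
--                 counter += d_d_1
--
--             for m in range(l, len(P)):
--                 if P[l] + P[k] + P[m] <= Lmt:
--                     dst_2 = list(set([k, l, m]))
--                     d_d_2 = sum([D[z] for z in dst_2])
--                     counter += d_d_2
--
--     return counter
-- ===== SOURCE B (Python) =====
-- def countCheckouts(Lmt):
--     P = list(range(1, 21)) + [2 * i for i in range(1, 21)] + [3 * i for i in range(1, 21)] + [25, 50]
--     doubles = [2 * i for i in range(1, 21)] + [50]
--     total = 0
--     for dv in doubles:
--         if dv <= Lmt:
--             total += 1
--         for s in P:
--             if s + dv <= Lmt: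
--                 total += 1
--         for i in range(62):
--             for j in range(i, 62):
--                 if P[i] + P[j] + dv <= Lmt:
--                     total += 1
--     return total
-- ===== Notes on version B (the rewrite author's own statement) =====
-- stated objective: faster
-- what changed: A enumerates every non-decreasing index triple over the full segment table and, per combination, builds a python set to dedup-count its finishing doubles; B instead loops over the finishing doubles only and counts, per double, the bare double, each single preceding dart, and each non-decreasing index pair of preceding darts, eliminating the innermost loop dimension and all per-combination set/dedup work.
import Mathlib
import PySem

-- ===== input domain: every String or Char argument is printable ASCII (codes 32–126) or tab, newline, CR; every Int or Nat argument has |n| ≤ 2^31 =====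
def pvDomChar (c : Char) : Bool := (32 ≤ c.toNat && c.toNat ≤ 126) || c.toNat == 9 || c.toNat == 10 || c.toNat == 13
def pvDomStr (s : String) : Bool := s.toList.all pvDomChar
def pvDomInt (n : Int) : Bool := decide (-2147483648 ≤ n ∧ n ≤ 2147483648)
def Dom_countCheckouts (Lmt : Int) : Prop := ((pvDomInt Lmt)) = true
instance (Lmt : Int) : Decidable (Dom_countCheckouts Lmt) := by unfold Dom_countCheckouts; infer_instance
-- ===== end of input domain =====

-- B replaces A's triple index loop (with a set-dedup weight built per combination) by an outer loop
-- over the finishing doubles with at most a pair loop inside (objective: faster, measured).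

-- ===== PORT A =====
def countCheckouts (Lmt : Int) : Int :=
  let P1 := PySem.List.pyRange 1 21 1
  let d_P := P1.map (fun i => 2 * i)
  let t_P := P1.map (fun i => 3 * i)
  let P := P1 ++ d_P ++ t_P ++ [25, 50]
  let D : List Int := List.replicate 20 0 ++ List.replicate 20 1 ++ List.replicate 20 0 ++ [0, 1]
  (PySem.List.pyRange 0 (P.length : Int) 1).foldl (fun counter k =>
    let counter := if PySem.List.pyGetD D k 0 = 1 ∧ PySem.List.pyGetD P k 0 ≤ Lmt then counter + 1 else counter
    (PySem.List.pyRange k (P.length : Int) 1).foldl (fun counter l =>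
      let counter :=
        if PySem.List.pyGetD P l 0 + PySem.List.pyGetD P k 0 ≤ Lmt then
          let dst_1 := PySem.Set.ofList [k, l]
          let d_d_1 := (dst_1.map (fun y => PySem.List.pyGetD D y 0)).sum
          counter + d_d_1
        else counter
      (PySem.List.pyRange l (P.length : Int) 1).foldl (fun counter m =>
        if PySem.List.pyGetD P l 0 + PySem.List.pyGetD P k 0 + PySem.List.pyGetD P m 0 ≤ Lmt then
          let dst_2 := PySem.Set.ofList [k, l, m]
          let d_d_2 := (dst_2.map (fun z => PySem.List.pyGetD D z 0)).sum
          counter + d_d_2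
        else counter) counter) counter) 0

-- ===== PORT B =====
def countCheckouts_alt (Lmt : Int) : Int :=
  let P := PySem.List.pyRange 1 21 1 ++ (PySem.List.pyRange 1 21 1).map (fun i => 2 * i)
             ++ (PySem.List.pyRange 1 21 1).map (fun i => 3 * i) ++ [25, 50]
  let doubles := (PySem.List.pyRange 1 21 1).map (fun i => 2 * i) ++ [50]
  doubles.foldl (fun total dv =>
    let total := if dv ≤ Lmt then total + 1 else total
    let total := P.foldl (fun total s => if s + dv ≤ Lmt then total + 1 else total) total
    (PySem.List.pyRange 0 62 1).foldl (fun total i =>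
      (PySem.List.pyRange i 62 1).foldl (fun total j =>
        if PySem.List.pyGetD P i 0 + PySem.List.pyGetD P j 0 + dv ≤ Lmt then total + 1
        else total) total) total) 0

-- ===== PRECONDITION & SPEC =====
def Spec_countCheckouts (Lmt : Int) (out : Int) : Prop := out = countCheckouts_alt Lmt
instance (Lmt : Int) (out : Int) : Decidable (Spec_countCheckouts Lmt out) := by unfold Spec_countCheckouts; infer_instance

-- ===== CLAIM (what is proved, stated in full; the proofs are below) =====
def Claim_equal_countCheckouts : Prop := ∀ (Lmt : Int), Dom_countCheckouts Lmt → Spec_countCheckouts Lmt (countCheckouts Lmt)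

-- ===== LEMMAS AND PROOFS =====

-- proof-side copies of the segment table and the is-a-double table
def pvalsA : List Int :=
  PySem.List.pyRange 1 21 1 ++ (PySem.List.pyRange 1 21 1).map (fun i => 2 * i)
    ++ (PySem.List.pyRange 1 21 1).map (fun i => 3 * i) ++ [25, 50]
def dvalsA : List Int :=
  List.replicate 20 0 ++ List.replicate 20 1 ++ List.replicate 20 0 ++ [0, 1]
def pfn (i : ℕ) : Int := pvalsA.getD i 0
def dfn (i : ℕ) : Int := dvalsA.getD i 0
def phi (L s : Int) : Int := if s ≤ L then 1 else 0

theorem pfn_def (i : ℕ) : pvalsA.getD i 0 = pfn i := rfl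
theorem dfn_def (i : ℕ) : dvalsA.getD i 0 = dfn i := rfl
theorem pfn_get (i : ℕ) : (pvalsA[i]?).getD 0 = pfn i := rfl
theorem dfn_get (i : ℕ) : (dvalsA[i]?).getD 0 = dfn i := rfl

theorem d01 (k : ℕ) : dfn k = 0 ∨ dfn k = 1 := by
  by_cases h : k < 62
  · have hb : ∀ k, k < 62 → (dfn k = 0 ∨ dfn k = 1) := by decide
    exact hb k h
  · left
    have hl : dvalsA.length = 62 := by decide
    unfold dfn
    rw [List.getD_eq_default _ _ (by omega)]

-- a foldl whose body adds a per-element amount is the sum of the amounts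
theorem foldl_body_add {α : Type} (f : Int → α → Int) (g : α → Int)
    (h : ∀ a x, f a x = a + g x) : ∀ (xs : List α) (a : Int),
    xs.foldl f a = a + (xs.map g).sum := by
  intro xs
  induction xs with
  | nil => intro a; simp
  | cons x xs ih => intro a; simp [List.foldl_cons, h, ih, add_assoc]

theorem sum_map_range (m : ℕ) (g : ℕ → Int) :
    ((List.range m).map g).sum = ∑ i ∈ Finset.range m, g i := by
  induction m with
  | zero => simp
  | succ m ih =>
      rw [List.range_succ, Finset.sum_range_succ, List.map_append, List.sum_append, ih]
      simp

theorem sum_map_pyRange (a n : ℕ) (f : Int → Int) :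
    ((PySem.List.pyRange (a : Int) (n : Int) 1).map f).sum
      = ∑ j ∈ Finset.Ico a n, f (j : Int) := by
  rw [PySem.List.pyRange_one, List.map_map]
  have h1 : (((n : Int) - (a : Int)).toNat) = n - a := by omega
  rw [h1, Finset.sum_Ico_eq_sum_range, sum_map_range]
  apply Finset.sum_congr rfl
  intro i _
  simp only [Function.comp_apply]
  push_cast
  ring_nf

theorem sum_map_range62 (f : Int → Int) :
    ((PySem.List.pyRange 0 62 1).map f).sum = ∑ j ∈ Finset.range 62, f (j : Int) := by
  have h := sum_map_pyRange 0 62 f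
  rw [Finset.range_eq_Ico]
  simpa using h

theorem sum_map_rangeK62 (a : ℕ) (f : Int → Int) :
    ((PySem.List.pyRange ((a : ℕ) : Int) 62 1).map f).sum = ∑ j ∈ Finset.Ico a 62, f (j : Int) := by
  have h := sum_map_pyRange a 62 f
  simpa using h

theorem sum_map_py121 (f : Int → Int) :
    ((PySem.List.pyRange 1 21 1).map f).sum = ∑ i ∈ Finset.range 20, f ((i : Int) + 1) := by
  rw [PySem.List.pyRange_one, List.map_map, show (((21 : Int) - 1).toNat) = 20 from rfl,
    sum_map_range]
  apply Finset.sum_congr rfl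
  intro i _
  simp only [Function.comp_apply]
  exact congrArg f (by ring)

theorem sum_map_list (xs : List Int) (f : Int → Int) :
    (xs.map f).sum = ∑ i ∈ Finset.range xs.length, f (xs.getD i 0) := by
  induction xs with
  | nil => simp
  | cons x xs ih =>
      rw [List.map_cons, List.sum_cons, ih, List.length_cons, Finset.sum_range_succ']
      simp [add_comm]

-- the weight A adds for an unordered pair of segment indices
theorem w1_eq (k l : ℕ) (hkl : k ≤ l) :
    ((PySem.Set.ofList [(k : Int), (l : Int)]).map (fun y => PySem.List.pyGetD dvalsA y 0)).sum
      = dfn k + (if k < l then dfn l else 0) := by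
  rcases Nat.lt_or_ge k l with h | h
  · have hne : ((k : Int)) ≠ (l : Int) := by exact_mod_cast Nat.ne_of_lt h
    rw [if_pos h]
    simp [PySem.Set.ofList, PySem.Set.add, Ne.symm hne, PySem.List.pyGetD_natCast, dfn_get]
  · have heq : k = l := le_antisymm hkl h
    subst heq
    rw [if_neg (lt_irrefl k)]
    simp [PySem.Set.ofList, PySem.Set.add, PySem.List.pyGetD_natCast, dfn_get]

-- the weight A adds for an unordered triple of segment indices
theorem w2_eq (k l m : ℕ) (hkl : k ≤ l) (hlm : l ≤ m) :
    ((PySem.Set.ofList [(k : Int), (l : Int), (m : Int)]).map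
        (fun z => PySem.List.pyGetD dvalsA z 0)).sum
      = dfn k + (if k < l then dfn l else 0) + (if l < m then dfn m else 0) := by
  rcases Nat.lt_or_ge k l with h1 | h1 <;> rcases Nat.lt_or_ge l m with h2 | h2
  · have hkl' : ((k : Int)) ≠ (l : Int) := by exact_mod_cast Nat.ne_of_lt h1
    have hlm' : ((l : Int)) ≠ (m : Int) := by exact_mod_cast Nat.ne_of_lt h2
    have hkm' : ((k : Int)) ≠ (m : Int) := by exact_mod_cast Nat.ne_of_lt (lt_trans h1 h2)
    rw [if_pos h1, if_pos h2]
    simp [PySem.Set.ofList, PySem.Set.add, Ne.symm hkl', Ne.symm hlm',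
      Ne.symm hkm', PySem.List.pyGetD_natCast, dfn_get, add_assoc]
  · have heq : l = m := le_antisymm hlm h2
    subst heq
    have hkl' : ((k : Int)) ≠ (l : Int) := by exact_mod_cast Nat.ne_of_lt h1
    rw [if_pos h1, if_neg (lt_irrefl l)]
    simp [PySem.Set.ofList, PySem.Set.add, Ne.symm hkl', PySem.List.pyGetD_natCast, dfn_get]
  · have heq : k = l := le_antisymm hkl h1
    subst heq
    have hlm' : ((k : Int)) ≠ (m : Int) := by exact_mod_cast Nat.ne_of_lt h2
    rw [if_neg (lt_irrefl k), if_pos h2]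
    simp [PySem.Set.ofList, PySem.Set.add, Ne.symm hlm', PySem.List.pyGetD_natCast, dfn_get]
  · have heq : k = l := le_antisymm hkl h1
    have heq2 : l = m := le_antisymm hlm h2
    subst heq; subst heq2
    rw [if_neg (lt_irrefl k)]
    simp [PySem.Set.ofList, PySem.Set.add, PySem.List.pyGetD_natCast, dfn_get]

theorem c1_eq (L : Int) (k : ℕ) :
    (if dfn k = 1 ∧ pfn k ≤ L then (1 : Int) else 0) = dfn k * phi L (pfn k) := by
  rcases d01 k with h | h <;> simp [h, phi]

theorem c2_eq (L : Int) (k l : ℕ) (hkl : k ≤ l) :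
    (if pfn l + pfn k ≤ L then
        ((PySem.Set.ofList [(k : Int), (l : Int)]).map (fun y => PySem.List.pyGetD dvalsA y 0)).sum
      else 0)
      = (dfn k + (if k < l then dfn l else 0)) * phi L (pfn l + pfn k) := by
  rw [w1_eq k l hkl]
  unfold phi
  split_ifs <;> ring

theorem c3_eq (L : Int) (k l m : ℕ) (hkl : k ≤ l) (hlm : l ≤ m) :
    (if pfn l + pfn k + pfn m ≤ L then
        ((PySem.Set.ofList [(k : Int), (l : Int), (m : Int)]).map
          (fun z => PySem.List.pyGetD dvalsA z 0)).sum
      else 0)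
      = (dfn k + (if k < l then dfn l else 0) + (if l < m then dfn m else 0))
          * phi L (pfn l + pfn k + pfn m) := by
  rw [w2_eq k l m hkl hlm]
  unfold phi
  split_ifs <;> ring

-- ==== A as a nested list sum ====

theorem A_fold (Lmt : Int) : countCheckouts Lmt =
    (PySem.List.pyRange 0 (pvalsA.length : Int) 1).foldl (fun counter k =>
      (PySem.List.pyRange k (pvalsA.length : Int) 1).foldl (fun counter' l =>
        (PySem.List.pyRange l (pvalsA.length : Int) 1).foldl (fun counter'' m =>
          if PySem.List.pyGetD pvalsA l 0 + PySem.List.pyGetD pvalsA k 0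
               + PySem.List.pyGetD pvalsA m 0 ≤ Lmt then
            counter'' + ((PySem.Set.ofList [k, l, m]).map
              (fun z => PySem.List.pyGetD dvalsA z 0)).sum
          else counter'')
          (if PySem.List.pyGetD pvalsA l 0 + PySem.List.pyGetD pvalsA k 0 ≤ Lmt then
            counter' + ((PySem.Set.ofList [k, l]).map
              (fun y => PySem.List.pyGetD dvalsA y 0)).sum
          else counter'))
        (if PySem.List.pyGetD dvalsA k 0 = 1 ∧ PySem.List.pyGetD pvalsA k 0 ≤ Lmt then
          counter + 1
        else counter)) 0 := rfl

theorem Afold3 (Lmt k l a : Int) :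
    (PySem.List.pyRange l 62 1).foldl (fun counter'' m =>
      if PySem.List.pyGetD pvalsA l 0 + PySem.List.pyGetD pvalsA k 0
           + PySem.List.pyGetD pvalsA m 0 ≤ Lmt then
        counter'' + ((PySem.Set.ofList [k, l, m]).map
          (fun z => PySem.List.pyGetD dvalsA z 0)).sum
      else counter'') a
    = a + ((PySem.List.pyRange l 62 1).map (fun m =>
        if PySem.List.pyGetD pvalsA l 0 + PySem.List.pyGetD pvalsA k 0
             + PySem.List.pyGetD pvalsA m 0 ≤ Lmt then
          ((PySem.Set.ofList [k, l, m]).map (fun z => PySem.List.pyGetD dvalsA z 0)).sum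
        else 0)).sum :=
  foldl_body_add _ _ (by intro a' m; split_ifs <;> ring) _ _

theorem Afold2 (Lmt k a : Int) :
    (PySem.List.pyRange k 62 1).foldl (fun counter' l =>
      (PySem.List.pyRange l 62 1).foldl (fun counter'' m =>
        if PySem.List.pyGetD pvalsA l 0 + PySem.List.pyGetD pvalsA k 0
             + PySem.List.pyGetD pvalsA m 0 ≤ Lmt then
          counter'' + ((PySem.Set.ofList [k, l, m]).map
            (fun z => PySem.List.pyGetD dvalsA z 0)).sum
        else counter'')
        (if PySem.List.pyGetD pvalsA l 0 + PySem.List.pyGetD pvalsA k 0 ≤ Lmt then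
          counter' + ((PySem.Set.ofList [k, l]).map
            (fun y => PySem.List.pyGetD dvalsA y 0)).sum
        else counter')) a
    = a + ((PySem.List.pyRange k 62 1).map (fun l =>
        (if PySem.List.pyGetD pvalsA l 0 + PySem.List.pyGetD pvalsA k 0 ≤ Lmt then
          ((PySem.Set.ofList [k, l]).map (fun y => PySem.List.pyGetD dvalsA y 0)).sum
        else 0)
        + ((PySem.List.pyRange l 62 1).map (fun m =>
            if PySem.List.pyGetD pvalsA l 0 + PySem.List.pyGetD pvalsA k 0
                 + PySem.List.pyGetD pvalsA m 0 ≤ Lmt then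
              ((PySem.Set.ofList [k, l, m]).map (fun z => PySem.List.pyGetD dvalsA z 0)).sum
            else 0)).sum)).sum :=
  foldl_body_add _ _ (by intro a' l; rw [Afold3]; split_ifs <;> ring) _ _

theorem A_listsum (Lmt : Int) : countCheckouts Lmt =
    ((PySem.List.pyRange 0 62 1).map (fun k =>
      (if PySem.List.pyGetD dvalsA k 0 = 1 ∧ PySem.List.pyGetD pvalsA k 0 ≤ Lmt then (1 : Int) else 0)
      + ((PySem.List.pyRange k 62 1).map (fun l =>
          (if PySem.List.pyGetD pvalsA l 0 + PySem.List.pyGetD pvalsA k 0 ≤ Lmt then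
            ((PySem.Set.ofList [k, l]).map (fun y => PySem.List.pyGetD dvalsA y 0)).sum
          else 0)
          + ((PySem.List.pyRange l 62 1).map (fun m =>
              if PySem.List.pyGetD pvalsA l 0 + PySem.List.pyGetD pvalsA k 0
                   + PySem.List.pyGetD pvalsA m 0 ≤ Lmt then
                ((PySem.Set.ofList [k, l, m]).map (fun z => PySem.List.pyGetD dvalsA z 0)).sum
              else 0)).sum)).sum)).sum := by
  rw [A_fold, show ((pvalsA.length : Int)) = (62 : Int) from by decide]
  refine (foldl_body_add _ _ ?_ _ _).trans (zero_add _)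
  intro a k
  rw [Afold2]
  split_ifs <;> ring

theorem A_sum (Lmt : Int) : countCheckouts Lmt =
    ∑ k ∈ Finset.range 62, (dfn k * phi Lmt (pfn k)
      + ∑ l ∈ Finset.Ico k 62, ((dfn k + (if k < l then dfn l else 0)) * phi Lmt (pfn l + pfn k)
        + ∑ m ∈ Finset.Ico l 62,
            (dfn k + (if k < l then dfn l else 0) + (if l < m then dfn m else 0))
              * phi Lmt (pfn l + pfn k + pfn m))) := by
  rw [A_listsum, sum_map_range62]
  apply Finset.sum_congr rfl
  intro k hk
  simp only [PySem.List.pyGetD_natCast, pfn_def, dfn_def]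
  rw [c1_eq]
  congr 1
  rw [sum_map_rangeK62]
  apply Finset.sum_congr rfl
  intro l hl
  obtain ⟨hkl, hl62⟩ := Finset.mem_Ico.mp hl
  simp only [PySem.List.pyGetD_natCast, pfn_def]
  rw [c2_eq Lmt k l hkl]
  congr 1
  rw [sum_map_rangeK62]
  apply Finset.sum_congr rfl
  intro m hm
  obtain ⟨hlm, hm62⟩ := Finset.mem_Ico.mp hm
  simp only [PySem.List.pyGetD_natCast, pfn_def]
  exact c3_eq Lmt k l m hkl hlm

-- ==== B as a sum over the finishing doubles ====

def doublesB : List Int := (PySem.List.pyRange 1 21 1).map (fun i => 2 * i) ++ [50]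

theorem B_fold (Lmt : Int) : countCheckouts_alt Lmt =
    doublesB.foldl (fun total dv =>
      (PySem.List.pyRange 0 62 1).foldl (fun total' i =>
        (PySem.List.pyRange i 62 1).foldl (fun total'' j =>
          if PySem.List.pyGetD pvalsA i 0 + PySem.List.pyGetD pvalsA j 0 + dv ≤ Lmt then
            total'' + 1
          else total'') total')
        (pvalsA.foldl (fun total' s => if s + dv ≤ Lmt then total' + 1 else total')
          (if dv ≤ Lmt then total + 1 else total))) 0 := rfl

theorem Bfold1 (Lmt dv a : Int) :
    pvalsA.foldl (fun total' s => if s + dv ≤ Lmt then total' + 1 else total') a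
    = a + (pvalsA.map (fun s => if s + dv ≤ Lmt then (1 : Int) else 0)).sum :=
  foldl_body_add _ _ (by intro a' s; split_ifs <;> ring) _ _

theorem Bfold3 (Lmt dv i a : Int) :
    (PySem.List.pyRange i 62 1).foldl (fun total'' j =>
      if PySem.List.pyGetD pvalsA i 0 + PySem.List.pyGetD pvalsA j 0 + dv ≤ Lmt then
        total'' + 1
      else total'') a
    = a + ((PySem.List.pyRange i 62 1).map (fun j =>
        if PySem.List.pyGetD pvalsA i 0 + PySem.List.pyGetD pvalsA j 0 + dv ≤ Lmt then (1 : Int)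
        else 0)).sum :=
  foldl_body_add _ _ (by intro a' j; split_ifs <;> ring) _ _

theorem Bfold2 (Lmt dv a : Int) :
    (PySem.List.pyRange 0 62 1).foldl (fun total' i =>
      (PySem.List.pyRange i 62 1).foldl (fun total'' j =>
        if PySem.List.pyGetD pvalsA i 0 + PySem.List.pyGetD pvalsA j 0 + dv ≤ Lmt then
          total'' + 1
        else total'') total') a
    = a + ((PySem.List.pyRange 0 62 1).map (fun i =>
        ((PySem.List.pyRange i 62 1).map (fun j =>
          if PySem.List.pyGetD pvalsA i 0 + PySem.List.pyGetD pvalsA j 0 + dv ≤ Lmt then (1 : Int)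
          else 0)).sum)).sum :=
  foldl_body_add _ _ (by intro a' i; rw [Bfold3]) _ _

theorem B_listsum (Lmt : Int) : countCheckouts_alt Lmt =
    (doublesB.map (fun dv =>
      (if dv ≤ Lmt then (1 : Int) else 0)
      + (pvalsA.map (fun s => if s + dv ≤ Lmt then (1 : Int) else 0)).sum
      + ((PySem.List.pyRange 0 62 1).map (fun i =>
          ((PySem.List.pyRange i 62 1).map (fun j =>
            if PySem.List.pyGetD pvalsA i 0 + PySem.List.pyGetD pvalsA j 0 + dv ≤ Lmt then (1 : Int)
            else 0)).sum)).sum)).sum := by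
  rw [B_fold]
  refine (foldl_body_add _ _ ?_ _ _).trans (zero_add _)
  intro a dv
  rw [Bfold2, Bfold1]
  split_ifs <;> ring

def FB (Lmt d : Int) : Int :=
  phi Lmt d + (∑ i ∈ Finset.range 62, phi Lmt (pfn i + d))
    + ∑ i ∈ Finset.range 62, ∑ j ∈ Finset.Ico i 62, phi Lmt (pfn i + pfn j + d)

theorem gB_eq (Lmt dv : Int) :
    (if dv ≤ Lmt then (1 : Int) else 0)
      + (pvalsA.map (fun s => if s + dv ≤ Lmt then (1 : Int) else 0)).sum
      + ((PySem.List.pyRange 0 62 1).map (fun i =>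
          ((PySem.List.pyRange i 62 1).map (fun j =>
            if PySem.List.pyGetD pvalsA i 0 + PySem.List.pyGetD pvalsA j 0 + dv ≤ Lmt then (1 : Int)
            else 0)).sum)).sum
    = FB Lmt dv := by
  unfold FB
  rw [sum_map_list, show pvalsA.length = 62 from by decide, sum_map_range62]
  have h3 : ∀ i : ℕ, ((PySem.List.pyRange ((i : ℕ) : Int) 62 1).map (fun j =>
      if PySem.List.pyGetD pvalsA ((i : ℕ) : Int) 0 + PySem.List.pyGetD pvalsA j 0 + dv ≤ Lmt
        then (1 : Int) else 0)).sum
      = ∑ j ∈ Finset.Ico i 62, phi Lmt (pfn i + pfn j + dv) := by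
    intro i
    rw [sum_map_rangeK62]
    apply Finset.sum_congr rfl
    intro j _
    simp [phi, PySem.List.pyGetD_natCast, pfn_get]
  simp only [h3, phi, pfn_def]
  rfl

-- sum over double indices = sum over the list of double values
theorem bridge (F : Int → Int) :
    ∑ k ∈ Finset.range 62, dfn k * F (pfn k)
      = (∑ i ∈ Finset.range 20, F (2 * ((i : Int) + 1))) + F 50 := by
  conv_lhs => rw [Finset.range_eq_Ico,
    ← Finset.sum_Ico_consecutive (fun k => dfn k * F (pfn k))
      (show (0:ℕ) ≤ 20 by norm_num) (show (20:ℕ) ≤ 62 by norm_num),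
    ← Finset.sum_Ico_consecutive (fun k => dfn k * F (pfn k))
      (show (20:ℕ) ≤ 40 by norm_num) (show (40:ℕ) ≤ 62 by norm_num),
    ← Finset.sum_Ico_consecutive (fun k => dfn k * F (pfn k))
      (show (40:ℕ) ≤ 61 by norm_num) (show (61:ℕ) ≤ 62 by norm_num)]
  have p1 : ∑ k ∈ Finset.Ico 0 20, dfn k * F (pfn k) = 0 := by
    apply Finset.sum_eq_zero
    intro k hk
    have hd : ∀ k, k < 20 → dfn k = 0 := by decide
    rw [hd k (Finset.mem_Ico.mp hk).2, zero_mul]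
  have p2 : ∑ k ∈ Finset.Ico 20 40, dfn k * F (pfn k)
      = ∑ i ∈ Finset.range 20, F (2 * ((i : Int) + 1)) := by
    rw [Finset.sum_Ico_eq_sum_range, show (40 - 20 : ℕ) = 20 from rfl]
    apply Finset.sum_congr rfl
    intro i hi
    have hfact : ∀ i, i < 20 → dfn (20 + i) = 1 ∧ pfn (20 + i) = 2 * ((i : Int) + 1) := by decide
    obtain ⟨h1, h2⟩ := hfact i (Finset.mem_range.mp hi)
    rw [h1, h2, one_mul]
  have p3 : ∑ k ∈ Finset.Ico 40 61, dfn k * F (pfn k) = 0 := by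
    apply Finset.sum_eq_zero
    intro k hk
    have hd : ∀ i, i < 21 → dfn (40 + i) = 0 := by decide
    obtain ⟨h1, h2⟩ := Finset.mem_Ico.mp hk
    have : k = 40 + (k - 40) := by omega
    rw [this, hd (k - 40) (by omega), zero_mul]
  have p4 : ∑ k ∈ Finset.Ico 61 62, dfn k * F (pfn k) = F 50 := by
    rw [Finset.sum_eq_sum_Ico_succ_bot (by norm_num)]
    rw [show Finset.Ico 62 62 = ∅ from Finset.Ico_self 62, Finset.sum_empty, add_zero]
    rw [show dfn 61 = 1 from by decide, show pfn 61 = 50 from by decide, one_mul]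
  rw [p1, p2, p3, p4]
  ring

set_option maxHeartbeats 1000000 in
theorem B_sum (Lmt : Int) : countCheckouts_alt Lmt =
    ∑ k ∈ Finset.range 62, dfn k * FB Lmt (pfn k) := by
  rw [B_listsum]
  unfold doublesB
  rw [List.map_append, List.sum_append, List.map_map]
  refine Eq.trans (congrArg₂ (· + ·) ?_ ?_) ((bridge (FB Lmt)).symm)
  · rw [sum_map_py121]
    simp only [Function.comp_apply]
    apply Finset.sum_congr rfl
    intro i _
    rw [gB_eq]
  · rw [List.map_cons, List.map_nil, List.sum_cons, List.sum_nil, add_zero, gB_eq]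

-- ==== the combinatorial reindexing identities ====

-- triangle swap for a strict inner condition
theorem sum_Ico_ite_strict (a n : ℕ) (f : ℕ → ℕ → Int) :
    ∑ x ∈ Finset.Ico a n, ∑ y ∈ Finset.Ico x n, (if x < y then f x y else 0)
      = ∑ y ∈ Finset.Ico a n, ∑ x ∈ Finset.Ico a y, f x y := by
  rw [Finset.sum_Ico_Ico_comm]
  apply Finset.sum_congr rfl
  intro y hy
  obtain ⟨hay, _⟩ := Finset.mem_Ico.mp hy
  rw [Finset.sum_Ico_succ_top hay]
  simp only [lt_irrefl, if_false, add_zero]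
  apply Finset.sum_congr rfl
  intro x hx
  rw [if_pos (Finset.mem_Ico.mp hx).2]

theorem identity2 (n : ℕ) (dd : ℕ → Int) (F : ℕ → ℕ → Int)
    (hF : ∀ a b, F a b = F b a) :
    ∑ k ∈ Finset.range n, ∑ l ∈ Finset.Ico k n, (dd k + (if k < l then dd l else 0)) * F k l
      = ∑ k ∈ Finset.range n, dd k * ∑ i ∈ Finset.range n, F k i := by
  have hsplit : ∀ k ∈ Finset.range n,
      dd k * ∑ i ∈ Finset.range n, F k i
        = (∑ i ∈ Finset.range k, dd k * F k i) + ∑ i ∈ Finset.Ico k n, dd k * F k i := by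
    intro k hk
    rw [Finset.mul_sum, Finset.range_eq_Ico,
      ← Finset.sum_Ico_consecutive _ (Nat.zero_le k) (le_of_lt (Finset.mem_range.mp hk)),
      ← Finset.range_eq_Ico]
  have hL : ∀ k ∈ Finset.range n,
      (∑ l ∈ Finset.Ico k n, (dd k + (if k < l then dd l else 0)) * F k l)
        = (∑ l ∈ Finset.Ico k n, (if k < l then dd l * F k l else 0))
          + ∑ l ∈ Finset.Ico k n, dd k * F k l := by
    intro k _
    rw [← Finset.sum_add_distrib]
    apply Finset.sum_congr rfl
    intro l _
    split_ifs <;> ring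
  rw [Finset.sum_congr rfl hsplit, Finset.sum_congr rfl hL,
    Finset.sum_add_distrib, Finset.sum_add_distrib]
  congr 1
  rw [Finset.range_eq_Ico, sum_Ico_ite_strict 0 n (fun x y => dd y * F x y)]
  apply Finset.sum_congr rfl
  intro y _
  rw [← Finset.range_eq_Ico]
  apply Finset.sum_congr rfl
  intro x _
  rw [hF y x]

theorem identity3 (n : ℕ) (dd : ℕ → Int) (G : ℕ → ℕ → ℕ → Int)
    (hG1 : ∀ a b c, G a b c = G b a c) (hG2 : ∀ a b c, G a b c = G a c b) :
    ∑ k ∈ Finset.range n, ∑ l ∈ Finset.Ico k n, ∑ m ∈ Finset.Ico l n,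
        (dd k + (if k < l then dd l else 0) + (if l < m then dd m else 0)) * G k l m
      = ∑ t ∈ Finset.range n, dd t * ∑ i ∈ Finset.range n, ∑ j ∈ Finset.Ico i n, G t i j := by
  have hsummand : ∀ k l m : ℕ,
      (dd k + (if k < l then dd l else 0) + (if l < m then dd m else 0)) * G k l m
        = dd k * G k l m + (if k < l then dd l * G k l m else 0)
          + (if l < m then dd m * G k l m else 0) := by
    intro k l m; split_ifs <;> ring
  have hLHS : ∑ k ∈ Finset.range n, ∑ l ∈ Finset.Ico k n, ∑ m ∈ Finset.Ico l n,
        (dd k + (if k < l then dd l else 0) + (if l < m then dd m else 0)) * G k l m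
      = ((∑ k ∈ Finset.range n, ∑ l ∈ Finset.Ico k n, ∑ m ∈ Finset.Ico l n, dd k * G k l m)
        + ∑ k ∈ Finset.range n, ∑ l ∈ Finset.Ico k n,
            (if k < l then dd l * ∑ m ∈ Finset.Ico l n, G k l m else 0))
        + ∑ k ∈ Finset.range n, ∑ l ∈ Finset.Ico k n, ∑ m ∈ Finset.Ico l n,
            (if l < m then dd m * G k l m else 0) := by
    simp only [hsummand, Finset.sum_add_distrib]
    congr 2
    apply Finset.sum_congr rfl; intro k _
    apply Finset.sum_congr rfl; intro l _
    split_ifs with h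
    · rw [Finset.mul_sum]
    · rw [Finset.sum_const_zero]
  have hRHS : ∑ t ∈ Finset.range n, dd t * ∑ i ∈ Finset.range n, ∑ j ∈ Finset.Ico i n, G t i j
      = ((∑ t ∈ Finset.range n, ∑ i ∈ Finset.Ico t n, ∑ j ∈ Finset.Ico i n, dd t * G t i j)
        + ∑ t ∈ Finset.range n, ∑ i ∈ Finset.range t, ∑ j ∈ Finset.Ico t n, dd t * G t i j)
        + ∑ t ∈ Finset.range n, ∑ i ∈ Finset.range t, ∑ j ∈ Finset.Ico i t, dd t * G t i j := by
    rw [← Finset.sum_add_distrib, ← Finset.sum_add_distrib]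
    apply Finset.sum_congr rfl
    intro t ht
    have htn : t ≤ n := le_of_lt (Finset.mem_range.mp ht)
    rw [Finset.mul_sum, Finset.range_eq_Ico,
      ← Finset.sum_Ico_consecutive (fun i => dd t * ∑ j ∈ Finset.Ico i n, G t i j)
        (Nat.zero_le t) htn, ← Finset.range_eq_Ico]
    have hinner : ∀ i ∈ Finset.range t,
        dd t * ∑ j ∈ Finset.Ico i n, G t i j
          = (∑ j ∈ Finset.Ico t n, dd t * G t i j) + ∑ j ∈ Finset.Ico i t, dd t * G t i j := by
      intro i hi
      have hit : i ≤ t := le_of_lt (Finset.mem_range.mp hi)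
      rw [Finset.mul_sum, ← Finset.sum_Ico_consecutive (fun j => dd t * G t i j) hit htn]
      ring
    have h1 : ∀ i ∈ Finset.Ico t n,
        dd t * ∑ j ∈ Finset.Ico i n, G t i j = ∑ j ∈ Finset.Ico i n, dd t * G t i j := by
      intro i _; rw [Finset.mul_sum]
    rw [Finset.sum_congr rfl hinner, Finset.sum_congr rfl h1, Finset.sum_add_distrib]
    ring
  rw [hLHS, hRHS]
  congr 1
  · congr 1
    rw [Finset.range_eq_Ico,
      sum_Ico_ite_strict 0 n (fun k l => dd l * ∑ m ∈ Finset.Ico l n, G k l m)]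
    apply Finset.sum_congr rfl
    intro t _
    rw [← Finset.range_eq_Ico]
    apply Finset.sum_congr rfl
    intro i _
    rw [Finset.mul_sum]
    apply Finset.sum_congr rfl
    intro j _
    rw [hG1 i t j]
  · have hstep : ∀ k ∈ Finset.range n,
        ∑ l ∈ Finset.Ico k n, ∑ m ∈ Finset.Ico l n, (if l < m then dd m * G k l m else 0)
          = ∑ m ∈ Finset.Ico k n, ∑ l ∈ Finset.Ico k m, dd m * G k l m := by
      intro k _
      exact sum_Ico_ite_strict k n (fun l m => dd m * G k l m)
    rw [Finset.sum_congr rfl hstep, Finset.range_eq_Ico, Finset.sum_Ico_Ico_comm]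
    apply Finset.sum_congr rfl
    intro t ht
    obtain ⟨h0t, _⟩ := Finset.mem_Ico.mp ht
    rw [Finset.sum_Ico_succ_top h0t, show Finset.Ico t t = ∅ from Finset.Ico_self t,
      Finset.sum_empty, add_zero, ← Finset.range_eq_Ico]
    apply Finset.sum_congr rfl
    intro i _
    apply Finset.sum_congr rfl
    intro j _
    rw [hG2 i j t, hG1 i t j]

-- ==== assembly ====

theorem AB_eq (Lmt : Int) : countCheckouts Lmt = countCheckouts_alt Lmt := by
  have e2 := identity2 62 dfn (fun k l => phi Lmt (pfn l + pfn k))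
    (fun a b => congrArg (phi Lmt) (add_comm (pfn b) (pfn a)))
  have e3 := identity3 62 dfn (fun k l m => phi Lmt (pfn l + pfn k + pfn m))
    (fun a b c => congrArg (phi Lmt) (by ring))
    (fun a b c => congrArg (phi Lmt) (by ring))
  simp only [] at e2 e3
  rw [A_sum, B_sum]
  simp only [FB, mul_add, Finset.sum_add_distrib]
  rw [e2, e3]
  have e3' : ∀ t ∈ Finset.range 62,
      dfn t * ∑ i ∈ Finset.range 62, ∑ j ∈ Finset.Ico i 62, phi Lmt (pfn i + pfn t + pfn j)
        = dfn t * ∑ i ∈ Finset.range 62, ∑ j ∈ Finset.Ico i 62, phi Lmt (pfn i + pfn j + pfn t) := by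
    intro t _
    congr 1
    apply Finset.sum_congr rfl
    intro i _
    apply Finset.sum_congr rfl
    intro j _
    exact congrArg (phi Lmt) (by ring)
  rw [Finset.sum_congr rfl e3']
  ring

-- ===== VERDICT (by name: the statement is the Claim_ definition above) =====
theorem countCheckouts_spec : Claim_equal_countCheckouts := by
  unfold Claim_equal_countCheckouts
  intro Lmt _
  unfold Spec_countCheckouts
  exact AB_eq Lmt
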